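-- pv_equiv track=rewrite | github.com/Rupali59/Obsidian | Scripts/automation/sync_quartz_to_obsidian.py | extract_daily_notes_content
-- ===== SOURCE A (Python) =====
-- def extract_daily_notes_content(content):
--     """Extract daily notes content, excluding GitHub activity and location info"""
--     lines = content.split('\n')
--     daily_notes_lines = []
--     in_daily_notes = False
--
--     for line in lines:
--         if '## Daily Notes' in line:
--             in_daily_notes = True
--             daily_notes_lines.append(line)
--             continue
--         elif line.startswith('## ') and in_daily_notes:
--             # End of daily notes section
--             break
--         elif in_daily_notes:
--             # Skip location-related lines and GitHub activity
--             if not any(keyword in line.lower() for keyword in ['location:', 'coordinates:', 'github activity']):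
--                 daily_notes_lines.append(line)
--
--     return '\n'.join(daily_notes_lines)
-- ===== SOURCE B (Python) =====
-- def extract_daily_notes_content(content):
--     """Extract daily notes content, excluding GitHub activity and location info"""
--     marker = '## Daily Notes'
--     lines = content.split('\n')
--     start = next((i for i, l in enumerate(lines) if marker in l), len(lines))
--     tail = lines[start + 1:]
--     stop = next((j for j, l in enumerate(tail)
--                  if l.startswith('## ') and marker not in l), len(tail))
--     section = lines[start:start + 1 + stop]
--     keywords = ('location:', 'coordinates:', 'github activity')
--     kept = [l for l in section
--             if marker in l or not any(k in l.lower() for k in keywords)]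
--     return '\n'.join(kept)
-- ===== Notes on version B (the rewrite author's own statement) =====
-- stated objective: alternative
-- what changed: Replaces A's stateful flag-and-break loop with a three-phase pipeline: locate the section start index, locate the section end index, slice the lines and filter out location/github lines with a comprehension.
import Mathlib
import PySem

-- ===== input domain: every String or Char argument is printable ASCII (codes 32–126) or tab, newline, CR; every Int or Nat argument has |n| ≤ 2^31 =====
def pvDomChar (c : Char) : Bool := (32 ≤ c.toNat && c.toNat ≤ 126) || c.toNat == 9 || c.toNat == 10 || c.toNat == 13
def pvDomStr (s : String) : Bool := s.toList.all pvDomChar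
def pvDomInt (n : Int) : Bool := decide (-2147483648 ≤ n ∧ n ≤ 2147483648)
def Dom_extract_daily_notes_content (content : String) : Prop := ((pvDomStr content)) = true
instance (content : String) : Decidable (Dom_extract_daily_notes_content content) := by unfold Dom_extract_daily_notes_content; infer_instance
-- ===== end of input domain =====

-- B replaces A's stateful flag-and-break loop with an index-based pipeline (find start, find end, slice, filter); same cost, different decomposition.


-- ===== PORT A =====
-- the for-loop with `continue`/`break` becomes structural recursion over the lines with accumulator and flag
def pvALoop (lines : List String) (acc : List String) (inDaily : Bool) : List String :=
  match lines with
  | [] => acc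
  | line :: rest =>
    if PySem.Str.isIn "## Daily Notes" line then
      pvALoop rest (acc ++ [line]) true
    else if PySem.Str.startswith line "## " && inDaily then
      acc  -- break
    else if inDaily then
      if !(["location:", "coordinates:", "github activity"].any
            (fun keyword => PySem.Str.isIn keyword (PySem.Str.lower line))) then
        pvALoop rest (acc ++ [line]) inDaily
      else
        pvALoop rest acc inDaily
    else
      pvALoop rest acc inDaily

def extract_daily_notes_content (content : String) : String :=
  PySem.Str.join "\n" (pvALoop ((PySem.Str.split? content "\n").getD []) [] false)

-- ===== PORT B =====
def extract_daily_notes_content_alt (content : String) : String :=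
  let lines := (PySem.Str.split? content "\n").getD []
  let start := (lines.findIdx? (fun l => PySem.Str.isIn "## Daily Notes" l)).getD lines.length
  let tail := PySem.List.slice lines (some ((start + 1 : Nat) : Int)) none
  let stop := (tail.findIdx? (fun l => PySem.Str.startswith l "## " &&
                 !PySem.Str.isIn "## Daily Notes" l)).getD tail.length
  let sect := PySem.List.slice lines (some ((start : Nat) : Int)) (some ((start + 1 + stop : Nat) : Int))
  let kept := sect.filter (fun l => PySem.Str.isIn "## Daily Notes" l ||
                 !(["location:", "coordinates:", "github activity"].any
                    (fun k => PySem.Str.isIn k (PySem.Str.lower l))))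
  PySem.Str.join "\n" kept

-- ===== PRECONDITION & SPEC =====
def Spec_extract_daily_notes_content (content : String) (out : String) : Prop := out = extract_daily_notes_content_alt content
instance (content : String) (out : String) : Decidable (Spec_extract_daily_notes_content content out) := by unfold Spec_extract_daily_notes_content; infer_instance

-- ===== CLAIM (what is proved, stated in full; the proofs are below) =====
def Claim_equal_extract_daily_notes_content : Prop := ∀ (content : String), Dom_extract_daily_notes_content content → Spec_extract_daily_notes_content content (extract_daily_notes_content content)

-- ===== LEMMAS AND PROOFS =====

-- the keep-predicate shared by both ports' filters
def pvKeep (l : String) : Bool :=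
  PySem.Str.isIn "## Daily Notes" l ||
    !(["location:", "coordinates:", "github activity"].any
       (fun k => PySem.Str.isIn k (PySem.Str.lower l)))

-- `take` up to the first index satisfying p (length if none) is `takeWhile (¬ p)`
theorem pv_take_findIdx? {α : Type} (p : α → Bool) (xs : List α) :
    xs.take ((xs.findIdx? p).getD xs.length) = xs.takeWhile (fun x => !p x) := by
  induction xs with
  | nil => simp
  | cons x xs ih =>
    by_cases h : p x
    · simp [List.findIdx?_cons, h]
    · cases hfi : xs.findIdx? p <;>
        simp [List.findIdx?_cons, h, hfi, ← ih]

-- A's loop with the flag set collects exactly: filter keep of the lines up to the next real header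
theorem pvALoop_true (lines acc : List String) :
    pvALoop lines acc true =
      acc ++ (lines.takeWhile
        (fun l => !(PySem.Str.startswith l "## " && !PySem.Str.isIn "## Daily Notes" l))).filter pvKeep := by
  induction lines generalizing acc with
  | nil => simp [pvALoop]
  | cons l rest ih =>
    by_cases hm : PySem.Str.isIn "## Daily Notes" l
    · simp at hm; simp [pvALoop, hm, pvKeep, ih]
    · by_cases hh : PySem.Str.startswith l "## "
      · simp at hm hh
        simp [pvALoop, hm, hh]
      · simp at hm hh
        simp only [pvALoop, List.takeWhile_cons, ih]
        simp [hm, hh]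
        split_ifs with h <;> simp [pvKeep, hm, h]

-- B's pipeline on a raw list of lines
def pvBCore (lines : List String) : List String :=
  let start := (lines.findIdx? (fun l => PySem.Str.isIn "## Daily Notes" l)).getD lines.length
  let tail := PySem.List.slice lines (some ((start + 1 : Nat) : Int)) none
  let stop := (tail.findIdx? (fun l => PySem.Str.startswith l "## " &&
                 !PySem.Str.isIn "## Daily Notes" l)).getD tail.length
  let sect := PySem.List.slice lines (some ((start : Nat) : Int)) (some ((start + 1 + stop : Nat) : Int))
  sect.filter pvKeep

theorem pv_main (lines : List String) : pvALoop lines [] false = pvBCore lines := by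
  induction lines with
  | nil => simp [pvALoop, pvBCore, PySem.List.slice]
  | cons l rest ih =>
    by_cases hm : PySem.Str.isIn "## Daily Notes" l
    · -- marker found at index 0: A switches to collecting, B slices from 0
      simp at hm
      rw [show pvALoop (l :: rest) [] false = pvALoop rest [l] true by
        simp [pvALoop, hm]]
      rw [pvALoop_true]
      simp only [pvBCore]
      rw [List.findIdx?_cons, if_pos (by simp [hm])]
      simp only [Option.getD_some, Nat.zero_add, PySem.List.slice_natCast,
        PySem.List.slice_from_natCast, List.drop_succ_cons, List.drop_zero, Nat.sub_zero]
      rw [Nat.add_comm 1, List.take_succ_cons, pv_take_findIdx?]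
      simp [pvKeep, hm]
    · -- not yet in the section: A skips the line, B's indices all shift by one
      simp at hm
      rw [show pvALoop (l :: rest) [] false = pvALoop rest [] false by
        simp [pvALoop, hm]]
      rw [ih]
      have hs : ((rest.findIdx? (fun l => PySem.Str.isIn "## Daily Notes" l)).map (· + 1)).getD
            (rest.length + 1)
          = (rest.findIdx? (fun l => PySem.Str.isIn "## Daily Notes" l)).getD rest.length + 1 := by
        cases rest.findIdx? (fun l => PySem.Str.isIn "## Daily Notes" l) <;> simp
      simp only [pvBCore]
      rw [List.findIdx?_cons, if_neg (by simp [hm]), List.length_cons, hs]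
      generalize (rest.findIdx? (fun l => PySem.Str.isIn "## Daily Notes" l)).getD rest.length = n
      simp only [PySem.List.slice_natCast, PySem.List.slice_from_natCast, List.drop_succ_cons]
      generalize ((List.drop (n + 1) rest).findIdx? (fun l => PySem.Str.startswith l "## " &&
        !PySem.Str.isIn "## Daily Notes" l)).getD (List.drop (n + 1) rest).length = s
      rw [show n + 1 + s - n = n + 1 + 1 + s - (n + 1) from by omega]

-- ===== VERDICT (by name: the statement is the Claim_ definition above) =====
theorem extract_daily_notes_content_spec : Claim_equal_extract_daily_notes_content := by
  intro content _
  unfold Spec_extract_daily_notes_content extract_daily_notes_content extract_daily_notes_content_alt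
  rw [pv_main]
  rfl
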